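-- pv_equiv track=rewrite | github.com/iuryFilho/safs | routes/graphs_routes.py | group_selected_metrics
-- ===== SOURCE A (Python) =====
-- def group_selected_metrics(grouped_metrics, chosen_metrics):
--     chosen_grouped_metrics = {}
--     for metric_group, metric_list in grouped_metrics.items():
--         for metric in chosen_metrics:
--             if metric in metric_list:
--                 chosen_grouped_metrics[metric_group] = chosen_grouped_metrics.get(
--                     metric_group, []
--                 ) + [metric]
--
--     return chosen_grouped_metrics
-- ===== SOURCE B (Python) =====
-- def group_selected_metrics(grouped_metrics, chosen_metrics):
--     # Inverse index: metric -> groups (grouped_metrics order, deduplicated).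
--     metric_to_groups = {}
--     for group, metric_list in grouped_metrics.items():
--         for metric in metric_list:
--             groups = metric_to_groups.setdefault(metric, [])
--             if group not in groups:
--                 groups.append(group)
--     # One pass over chosen_metrics fills per-group buckets in chosen order.
--     buckets = {}
--     for metric in chosen_metrics:
--         for group in metric_to_groups.get(metric, []):
--             buckets.setdefault(group, []).append(metric)
--     # Emit groups in grouped_metrics key order, like A does.
--     return {group: buckets[group] for group in grouped_metrics if group in buckets}
-- ===== Notes on version B (the rewrite author's own statement) =====
-- stated objective: faster
-- what changed: Replaces A's per-group linear rescan of chosen_metrics against each metric_list with an inverse index metric->groups built once, a single pass over chosen_metrics filling per-group buckets via dict lookups, and a final emission in grouped_metrics key order.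
import Mathlib
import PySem

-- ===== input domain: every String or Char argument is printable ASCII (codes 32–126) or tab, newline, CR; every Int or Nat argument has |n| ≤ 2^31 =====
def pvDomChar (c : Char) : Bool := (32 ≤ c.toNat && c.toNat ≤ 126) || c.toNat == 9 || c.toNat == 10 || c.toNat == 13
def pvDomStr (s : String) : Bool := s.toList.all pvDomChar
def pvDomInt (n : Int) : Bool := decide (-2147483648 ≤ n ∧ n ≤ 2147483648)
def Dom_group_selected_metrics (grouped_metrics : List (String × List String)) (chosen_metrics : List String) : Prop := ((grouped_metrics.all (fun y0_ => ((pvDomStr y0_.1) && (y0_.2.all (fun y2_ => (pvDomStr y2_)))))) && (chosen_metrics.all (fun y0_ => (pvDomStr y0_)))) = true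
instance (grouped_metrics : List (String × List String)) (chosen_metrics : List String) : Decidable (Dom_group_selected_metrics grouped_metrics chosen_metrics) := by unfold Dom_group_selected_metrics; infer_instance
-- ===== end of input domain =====

-- B replaces A's group-by-group rescan of chosen_metrics (nested membership scans)
-- with an inverse index metric -> groups built once, one pass over chosen_metrics
-- filling per-group buckets, and a final emission in grouped_metrics key order
-- (objective: faster; a timing run measured B faster on the generated inputs).

-- ===== PORT A =====
def group_selected_metrics (grouped_metrics : List (String × List String)) (chosen_metrics : List String) : List (String × List String) :=
  (grouped_metrics.foldl (fun d p =>
      chosen_metrics.foldl (fun d m =>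
          if m ∈ p.2 then d.insert p.1 (d.getD p.1 [] ++ [m]) else d) d)
    PySem.Dict.empty).items

-- ===== PORT B =====
def group_selected_metrics_alt (grouped_metrics : List (String × List String)) (chosen_metrics : List String) : List (String × List String) :=
  let index : PySem.Dict String (List String) :=
    grouped_metrics.foldl (fun d p =>
      p.2.foldl (fun d m =>
        let gs := d.getD m []
        if p.1 ∈ gs then d else d.insert m (gs ++ [p.1])) d) PySem.Dict.empty
  let buckets : PySem.Dict String (List String) :=
    chosen_metrics.foldl (fun b m =>
      (index.getD m []).foldl (fun b g => b.insert g (b.getD g [] ++ [m])) b) PySem.Dict.empty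
  (grouped_metrics.foldl (fun r p =>
      match buckets.get? p.1 with
      | some v => r.insert p.1 v
      | none => r) PySem.Dict.empty).items

-- ===== PRECONDITION & SPEC =====
-- Pre_ excludes association lists with duplicate group keys: Python A's grouped_metrics
-- is a dict, whose keys are necessarily distinct, so such lists have no Python counterpart.
def Pre_group_selected_metrics (grouped_metrics : List (String × List String)) (chosen_metrics : List String) : Prop :=
  (grouped_metrics.map Prod.fst).Nodup
instance (grouped_metrics : List (String × List String)) (chosen_metrics : List String) : Decidable (Pre_group_selected_metrics grouped_metrics chosen_metrics) := by unfold Pre_group_selected_metrics; infer_instance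
def pvWitness_group_selected_metrics : (List (String × List String)) × List String :=
  ([("net", ["lat", "thr"]), ("cpu", ["load"])], ["thr", "load", "lat"])
def Spec_group_selected_metrics (grouped_metrics : List (String × List String)) (chosen_metrics : List String) (out : List (String × List String)) : Prop := out = group_selected_metrics_alt grouped_metrics chosen_metrics
instance (grouped_metrics : List (String × List String)) (chosen_metrics : List String) (out : List (String × List String)) : Decidable (Spec_group_selected_metrics grouped_metrics chosen_metrics out) := by unfold Spec_group_selected_metrics; infer_instance

-- ===== CLAIM (what is proved, stated in full; the proofs are below) =====
def Claim_equal_group_selected_metrics : Prop := ∀ (grouped_metrics : List (String × List String)) (chosen_metrics : List String), Dom_group_selected_metrics grouped_metrics chosen_metrics → Pre_group_selected_metrics grouped_metrics chosen_metrics → Spec_group_selected_metrics grouped_metrics chosen_metrics (group_selected_metrics grouped_metrics chosen_metrics)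

-- ===== LEMMAS AND PROOFS =====

-- The common specification both ports are reduced to.
def gsmSpec (gm : List (String × List String)) (cm : List String) : List (String × List String) :=
  gm.filterMap (fun p => let v := cm.filter (· ∈ p.2); if v = [] then none else some (p.1, v))

-- A-side: the inner loop over chosen_metrics, once key g has been created with value acc.
theorem gsmA_inner (g : String) (L : List String) (d : PySem.Dict String (List String)) :
    ∀ (cm : List String) (acc : List String),
      cm.foldl (fun d m => if m ∈ L then d.insert g (d.getD g [] ++ [m]) else d) (d.insert g acc)
        = d.insert g (acc ++ cm.filter (· ∈ L)) := by
  intro cm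
  induction cm with
  | nil => intro acc; simp
  | cons m cm ih =>
    intro acc
    by_cases hm : m ∈ L
    · simp only [List.foldl_cons, hm, if_true, PySem.Dict.getD_insert_self,
        PySem.Dict.insert_insert_self]
      rw [ih (acc ++ [m])]
      simp [hm]
    · simp only [List.foldl_cons, if_neg hm, ih, List.filter_cons]
      simp [hm]

-- A-side: the inner loop over chosen_metrics from a dict not yet containing g.
theorem gsmA_inner0 (g : String) (L : List String) (cm : List String)
    (d : PySem.Dict String (List String)) (hg : d.contains g = false) :
    cm.foldl (fun d m => if m ∈ L then d.insert g (d.getD g [] ++ [m]) else d) d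
      = if cm.filter (· ∈ L) = [] then d else d.insert g (cm.filter (· ∈ L)) := by
  induction cm with
  | nil => simp
  | cons m cm ih =>
    by_cases hm : m ∈ L
    · simp only [List.foldl_cons, hm, if_true,
        PySem.Dict.getD_of_not_contains d [] hg, List.nil_append]
      rw [gsmA_inner g L d cm [m]]
      simp [hm]
    · simp only [List.foldl_cons, if_neg hm, ih, List.filter_cons]
      simp [hm]

-- A-side: the outer loop over grouped_metrics appends exactly the spec entries.
theorem gsmSpec_cons (p : String × List String) (gm : List (String × List String)) (cm : List String) :
    gsmSpec (p :: gm) cm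
      = (if cm.filter (· ∈ p.2) = [] then [] else [(p.1, cm.filter (· ∈ p.2))]) ++ gsmSpec gm cm := by
  simp only [gsmSpec, List.filterMap_cons]
  by_cases h : cm.filter (· ∈ p.2) = []
  · rw [if_pos h, if_pos h]
    rfl
  · rw [if_neg h, if_neg h]
    rfl

theorem gsmA_outer (cm : List String) :
    ∀ (gm : List (String × List String)) (d : PySem.Dict String (List String)),
      (gm.map Prod.fst).Nodup → (∀ p ∈ gm, d.contains p.1 = false) →
      (gm.foldl (fun d p =>
          cm.foldl (fun d m => if m ∈ p.2 then d.insert p.1 (d.getD p.1 [] ++ [m]) else d) d) d).items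
        = d.items ++ gsmSpec gm cm := by
  intro gm
  induction gm with
  | nil => intro d _ _; simp [gsmSpec]
  | cons p gm ih =>
    intro d hnd hfresh
    simp only [List.map_cons, List.nodup_cons] at hnd
    have hfp : d.contains p.1 = false := hfresh p (List.mem_cons_self)
    simp only [List.foldl_cons]
    rw [gsmA_inner0 p.1 p.2 cm d hfp]
    by_cases hf : cm.filter (· ∈ p.2) = []
    · rw [if_pos hf, ih d hnd.2 (fun q hq => hfresh q (List.mem_cons_of_mem _ hq)),
        gsmSpec_cons]
      simp [hf]
    · rw [if_neg hf, ih (d.insert p.1 (cm.filter (· ∈ p.2))) hnd.2 ?fresh]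
      · rw [PySem.Dict.items_insert_of_not_contains d _ hfp, gsmSpec_cons]
        simp [hf]
      case fresh =>
        intro q hq
        rw [PySem.Dict.contains_insert]
        have hq1 : q.1 ≠ p.1 := by
          intro he
          exact hnd.1 (he ▸ List.mem_map_of_mem hq)
        simp [hq1, hfresh q (List.mem_cons_of_mem _ hq)]

theorem gsm_spec_A : ∀ (gm : List (String × List String)) (cm : List String),
    (gm.map Prod.fst).Nodup → group_selected_metrics gm cm = gsmSpec gm cm := by
  intro gm cm hnd
  unfold group_selected_metrics
  rw [gsmA_outer cm gm PySem.Dict.empty hnd (fun p _ => PySem.Dict.contains_empty p.1)]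
  simp [PySem.Dict.empty]

-- B-side: one group's metric_list updates the inverse index.
theorem gsmB_idx_inner (g : String) :
    ∀ (L : List String) (d : PySem.Dict String (List String)) (m : String),
      (L.foldl (fun d m =>
          let gs := d.getD m []
          if g ∈ gs then d else d.insert m (gs ++ [g])) d).getD m []
        = if m ∈ L ∧ g ∉ d.getD m [] then d.getD m [] ++ [g] else d.getD m [] := by
  intro L
  induction L with
  | nil => intro d m; simp
  | cons m' L ih =>
    intro d m
    simp only [List.foldl_cons]
    by_cases hgm : g ∈ d.getD m' []
    · rw [if_pos hgm, ih]
      by_cases hmm : m = m'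
      · subst hmm; simp [hgm]
      · simp [hmm]
    · rw [if_neg hgm, ih]
      by_cases hmm : m = m'
      · subst hmm
        simp [PySem.Dict.getD_insert, hgm]
      · simp [PySem.Dict.getD_insert, hmm]

-- B-side: the whole index-building loop, extensionally.
theorem gsmB_idx_outer :
    ∀ (gm : List (String × List String)) (d : PySem.Dict String (List String)),
      (gm.map Prod.fst).Nodup → (∀ q ∈ gm, ∀ m, q.1 ∉ d.getD m []) →
      ∀ m, (gm.foldl (fun d p =>
          p.2.foldl (fun d m =>
            let gs := d.getD m []
            if p.1 ∈ gs then d else d.insert m (gs ++ [p.1])) d) d).getD m []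
        = d.getD m [] ++ (gm.filter (fun p => m ∈ p.2)).map Prod.fst := by
  intro gm
  induction gm with
  | nil => intro d _ _ m; simp
  | cons p gm ih =>
    intro d hnd hfree m
    simp only [List.map_cons, List.nodup_cons] at hnd
    simp only [List.foldl_cons]
    have hstep : ∀ m, (p.2.foldl (fun d m =>
        let gs := d.getD m []
        if p.1 ∈ gs then d else d.insert m (gs ++ [p.1])) d).getD m []
        = d.getD m [] ++ (if m ∈ p.2 then [p.1] else []) := by
      intro m
      rw [gsmB_idx_inner]
      by_cases hm : m ∈ p.2
      · simp [hm, hfree p List.mem_cons_self m]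
      · simp [hm]
    rw [ih _ hnd.2 ?free m, hstep m]
    · simp only [List.filter_cons]
      by_cases hm : m ∈ p.2 <;> simp [hm]
    case free =>
      intro q hq m
      rw [hstep m]
      intro hmem
      rcases List.mem_append.mp hmem with h1 | h2
      · exact hfree q (List.mem_cons_of_mem _ hq) m h1
      · have : q.1 = p.1 := by
          by_cases hm : m ∈ p.2 <;> simp [hm] at h2
          exact h2
        exact hnd.1 (this ▸ List.mem_map_of_mem hq)

-- B-side: one chosen metric appended to each bucket of a duplicate-free group list.
theorem gsmB_bk_inner (m : String) :
    ∀ (gs : List String) (b : PySem.Dict String (List String)), gs.Nodup → ∀ g,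
      (gs.foldl (fun b g => b.insert g (b.getD g [] ++ [m])) b).get? g
        = if g ∈ gs then some ((b.get? g).getD [] ++ [m]) else b.get? g := by
  intro gs
  induction gs with
  | nil => intro b _ g; simp
  | cons g' gs ih =>
    intro b hnd g
    simp only [List.nodup_cons] at hnd
    simp only [List.foldl_cons]
    rw [ih _ hnd.2]
    by_cases hg : g = g'
    · subst hg
      simp [hnd.1, PySem.Dict.get?_insert_self, PySem.Dict.getD_eq_get?_getD]
    · simp [hg, PySem.Dict.get?_insert_of_ne b _ hg]

-- B-side: the whole bucket-filling loop, extensionally.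
theorem gsmB_bk_outer (idx : PySem.Dict String (List String))
    (hI : ∀ m, (idx.getD m []).Nodup) :
    ∀ (cm : List String) (b : PySem.Dict String (List String)) (g : String),
      (cm.foldl (fun b m =>
          (idx.getD m []).foldl (fun b g => b.insert g (b.getD g [] ++ [m])) b) b).get? g
        = if cm.filter (fun m => g ∈ idx.getD m []) = [] then b.get? g
          else some ((b.get? g).getD [] ++ cm.filter (fun m => g ∈ idx.getD m [])) := by
  intro cm
  induction cm with
  | nil => intro b g; simp
  | cons m cm ih =>
    intro b g
    simp only [List.foldl_cons]
    rw [ih]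
    rw [gsmB_bk_inner m _ b (hI m) g]
    simp only [List.filter_cons]
    by_cases hg : g ∈ idx.getD m []
    · simp only [hg, decide_true, if_true]
      by_cases hf : cm.filter (fun m => g ∈ idx.getD m []) = [] <;>
        simp [hf]
    · simp [hg]

-- B-side: the final emission loop over grouped_metrics.
theorem gsmB_fin (B : PySem.Dict String (List String)) :
    ∀ (gm : List (String × List String)) (r : PySem.Dict String (List String)),
      (gm.map Prod.fst).Nodup → (∀ p ∈ gm, r.contains p.1 = false) →
      (gm.foldl (fun r p =>
          match B.get? p.1 with
          | some v => r.insert p.1 v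
          | none => r) r).items
        = r.items ++ gm.filterMap (fun p => (B.get? p.1).map (fun v => (p.1, v))) := by
  intro gm
  induction gm with
  | nil => intro r _ _; simp
  | cons p gm ih =>
    intro r hnd hfresh
    simp only [List.map_cons, List.nodup_cons] at hnd
    have hfp : r.contains p.1 = false := hfresh p List.mem_cons_self
    simp only [List.foldl_cons, List.filterMap_cons]
    cases hb : B.get? p.1 with
    | none =>
      rw [ih r hnd.2 (fun q hq => hfresh q (List.mem_cons_of_mem _ hq))]
      simp
    | some v =>
      rw [ih (r.insert p.1 v) hnd.2 ?fresh]
      · rw [PySem.Dict.items_insert_of_not_contains r _ hfp]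
        simp
      case fresh =>
        intro q hq
        rw [PySem.Dict.contains_insert]
        have hq1 : q.1 ≠ p.1 := fun he => hnd.1 (he ▸ List.mem_map_of_mem hq)
        simp [hq1, hfresh q (List.mem_cons_of_mem _ hq)]

theorem gsm_spec_B : ∀ (gm : List (String × List String)) (cm : List String),
    (gm.map Prod.fst).Nodup → group_selected_metrics_alt gm cm = gsmSpec gm cm := by
  intro gm cm hnd
  unfold group_selected_metrics_alt
  have hidx : ∀ m, (gm.foldl (fun d p =>
      p.2.foldl (fun d m =>
        let gs := d.getD m []
        if p.1 ∈ gs then d else d.insert m (gs ++ [p.1])) d) PySem.Dict.empty).getD m []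
      = (gm.filter (fun p => m ∈ p.2)).map Prod.fst := by
    intro m
    rw [gsmB_idx_outer gm PySem.Dict.empty hnd (fun q _ m => by simp)]
    simp
  set idx := gm.foldl (fun d p =>
      p.2.foldl (fun d m =>
        let gs := d.getD m []
        if p.1 ∈ gs then d else d.insert m (gs ++ [p.1])) d) PySem.Dict.empty with hidxdef
  have hInod : ∀ m, (idx.getD m []).Nodup := by
    intro m
    rw [hidx m]
    exact hnd.sublist (List.Sublist.map Prod.fst List.filter_sublist)
  have hmemidx : ∀ p ∈ gm, ∀ m, (p.1 ∈ idx.getD m []) ↔ m ∈ p.2 := by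
    intro p hp m
    rw [hidx m]
    constructor
    · intro h
      rcases List.mem_map.mp h with ⟨q, hq, hq1⟩
      rcases List.mem_filter.mp hq with ⟨hqgm, hq2⟩
      have : q = p := List.inj_on_of_nodup_map hnd hqgm hp hq1
      subst this
      exact of_decide_eq_true hq2
    · intro h
      exact List.mem_map_of_mem (List.mem_filter.mpr ⟨hp, decide_eq_true h⟩)
  have hbk : ∀ p ∈ gm, (cm.foldl (fun b m =>
      (idx.getD m []).foldl (fun b g => b.insert g (b.getD g [] ++ [m])) b)
        PySem.Dict.empty).get? p.1
      = if cm.filter (· ∈ p.2) = [] then none else some (cm.filter (· ∈ p.2)) := by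
    intro p hp
    rw [gsmB_bk_outer idx hInod cm PySem.Dict.empty p.1]
    have hfe : cm.filter (fun m => p.1 ∈ idx.getD m []) = cm.filter (· ∈ p.2) :=
      List.filter_congr (fun m _ => by
        simp only [decide_eq_decide]
        exact hmemidx p hp m)
    rw [hfe]
    by_cases hf : cm.filter (· ∈ p.2) = [] <;> simp [hf]
  rw [gsmB_fin _ gm PySem.Dict.empty hnd (fun p _ => PySem.Dict.contains_empty p.1)]
  rw [show (PySem.Dict.empty : PySem.Dict String (List String)).items = [] from rfl, List.nil_append]
  refine List.filterMap_congr (fun p hp => ?_)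
  rw [hbk p hp]
  by_cases hf : cm.filter (· ∈ p.2) = [] <;> simp [hf]

-- ===== VERDICT (by name: the statement is the Claim_ definition above) =====
theorem group_selected_metrics_spec : Claim_equal_group_selected_metrics := by
  intro gm cm _ hpre
  unfold Spec_group_selected_metrics
  rw [gsm_spec_A gm cm hpre, gsm_spec_B gm cm hpre]
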